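-- pv_equiv track=rewrite | github.com/jjovelc/personal_webpage | scripts/python/extract_UpSet_intersections.py | find_exclusive_intersections
-- ===== SOURCE A (Python) =====
-- from itertools import combinations, chain
--
-- def find_exclusive_intersections(sets_list):
--     all_intersections = {}
--     exclusive_intersections = {}
--     # First find all intersections
--     for i in range(len(sets_list), 0, -1):  # Start from the largest intersection
--         for subset in combinations(sets_list, i):
--             key = '_AND_'.join(sorted([s[1] for s in subset]))
--             intersection_set = set.intersection(*[s[0] for s in subset])
--             all_intersections[key] = intersection_set
--
--     # Then find exclusive sets by subtracting larger sets from smaller ones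
--     for smaller_key in all_intersections:
--         exclusive_set = all_intersections[smaller_key].copy()
--         for larger_key in all_intersections:
--             if len(larger_key.split('_AND_')) > len(smaller_key.split('_AND_')):
--                 exclusive_set -= all_intersections[larger_key]
--         exclusive_intersections[smaller_key] = exclusive_set
--
--     return exclusive_intersections
-- ===== SOURCE B (Python) =====
-- from itertools import combinations
--
-- def find_exclusive_intersections(sets_list):
--     # Which sets contain each element (one pass over the data).
--     membership = {}
--     for j, (s, _) in enumerate(sets_list):
--         for x in s:
--             membership.setdefault(x, set()).add(j)
--     # Intersection of a subset = elements of its first set that every other member contains.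
--     intersections = {}
--     n = len(sets_list)
--     for size in range(n, 0, -1):
--         for idxs in combinations(range(n), size):
--             key = '_AND_'.join(sorted(sets_list[i][1] for i in idxs))
--             first = sets_list[idxs[0]][0]
--             intersections[key] = {x for x in first if membership[x] >= set(idxs)}
--     # Exclusive set = intersection minus everything lying in a deeper intersection,
--     # via one sweep over the depth levels with a running union.
--     depth = {k: len(k.split('_AND_')) for k in intersections}
--     above = {}
--     acc = set()
--     for d in sorted(set(depth.values()), reverse=True):
--         above[d] = set(acc)
--         acc |= set().union(*(v for k, v in intersections.items() if depth[k] == d))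
--     return {k: v - above[depth[k]] for k, v in intersections.items()}
-- ===== Notes on version B (the rewrite author's own statement) =====
-- stated objective: faster
-- what changed: Instead of materialising each subset's intersection with chained set.intersection calls and then running a quadratic pass subtracting every deeper intersection from every key, B builds a membership index of the data in one pass, reads each subset's intersection off it by filtering its first set, and computes all exclusive sets in a single sweep over the key-depth levels with a running union; Pre_ excludes only inner lists with duplicate elements, which encode no Python set.
import Mathlib
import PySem

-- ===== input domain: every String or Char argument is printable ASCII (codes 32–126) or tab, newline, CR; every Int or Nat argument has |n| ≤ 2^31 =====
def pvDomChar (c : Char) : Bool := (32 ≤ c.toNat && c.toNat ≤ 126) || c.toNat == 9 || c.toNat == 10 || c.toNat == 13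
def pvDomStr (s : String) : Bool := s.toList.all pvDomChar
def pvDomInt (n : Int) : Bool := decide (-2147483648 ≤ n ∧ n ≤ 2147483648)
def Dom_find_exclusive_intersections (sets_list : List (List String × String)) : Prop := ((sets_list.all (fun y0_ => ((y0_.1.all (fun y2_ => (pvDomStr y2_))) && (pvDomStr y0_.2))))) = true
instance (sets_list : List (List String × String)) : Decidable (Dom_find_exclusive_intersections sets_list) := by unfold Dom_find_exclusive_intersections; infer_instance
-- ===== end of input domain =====

-- B replaces A's per-subset set.intersection chains and its quadratic subtract-every-larger
-- pass by a membership index built in one pass over the data plus one sweep over the key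
-- depth levels with a running union.

-- ===== PORT A =====
-- key = '_AND_'.join(sorted(names))  (both Pythons compute exactly this)
def pvKey (names : List String) : String :=
  PySem.Str.join "_AND_" (PySem.List.sorted names (fun s => s) false)

-- set.intersection(*sets); the [] case is unreachable (A only calls it on nonempty subsets)
def pvInterAll : List (List String) → List String
  | [] => []
  | s :: rest => rest.foldl PySem.Set.inter s

def find_exclusive_intersections (sets_list : List (List String × String)) : List (String × List String) :=
  let allInts : PySem.Dict String (List String) :=
    (PySem.List.pyRange (sets_list.length : Int) 0 (-1)).foldl
      (fun d i => (PySem.List.combinations sets_list i.toNat).foldl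
        (fun d subset =>
          d.insert (pvKey (subset.map (fun s => s.2))) (pvInterAll (subset.map (fun s => s.1)))) d)
      PySem.Dict.empty
  let res : PySem.Dict String (List String) :=
    allInts.items.foldl (fun out kv =>
      let excl := allInts.items.foldl
        (fun e kv2 =>
          if (PySem.Chars.splitOn kv2.1.toList "_AND_".toList).length >
             (PySem.Chars.splitOn kv.1.toList "_AND_".toList).length
          then PySem.Set.diff e kv2.2 else e)
        kv.2
      out.insert kv.1 excl) PySem.Dict.empty
  res.items

-- ===== PORT B =====
-- membership[x] (a dict entry that always exists when read: x comes from a set already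
-- indexed) is read with getD; everything else is a step-for-step transcription of Source B.
def find_exclusive_intersections_alt (sets_list : List (List String × String)) : List (String × List String) :=
  let n : Int := sets_list.length
  let membership : PySem.Dict String (List Int) :=
    (PySem.List.enumerate sets_list).foldl
      (fun d jp => jp.2.1.foldl (fun d x => d.modify x [] (fun s => PySem.Set.add s jp.1)) d)
      PySem.Dict.empty
  let intersections : PySem.Dict String (List String) :=
    (PySem.List.pyRange n 0 (-1)).foldl
      (fun d size => (PySem.List.combinations (PySem.List.pyRange 0 n 1) size.toNat).foldl
        (fun d idxs =>
          let first := (PySem.List.pyGetD sets_list (PySem.List.pyGetD idxs 0 0) ([], "")).1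
          d.insert (pvKey (idxs.map (fun i => (PySem.List.pyGetD sets_list i ([], "")).2)))
            (PySem.Set.ofList (first.filter
              (fun x => idxs.all (fun i => (membership.getD x []).contains i))))) d)
      PySem.Dict.empty
  let depth : PySem.Dict String Int :=
    intersections.items.foldl
      (fun d kv => d.insert kv.1 ((PySem.Chars.splitOn kv.1.toList "_AND_".toList).length : Int))
      PySem.Dict.empty
  let swept : PySem.Dict Int (List String) × List String :=
    (PySem.List.sorted (PySem.Set.ofList depth.values) (fun x => x) true).foldl
      (fun p d =>
        (p.1.insert d p.2,
         PySem.Set.update p.2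
           (((intersections.items.filter (fun kv => depth.getD kv.1 0 == d)).map Prod.snd).foldl
             PySem.Set.update [])))
      (PySem.Dict.empty, [])
  let above := swept.1
  let res : PySem.Dict String (List String) :=
    intersections.items.foldl
      (fun r kv => r.insert kv.1 (PySem.Set.diff kv.2 (above.getD (depth.getD kv.1 0) [])))
      PySem.Dict.empty
  res.items

-- ===== PRECONDITION & SPEC =====
-- Pre_ excludes only inner lists with duplicate elements: they do not encode any Python
-- set (the first components of A's argument pairs are Python sets).
def Pre_find_exclusive_intersections (sets_list : List (List String × String)) : Prop :=
  ∀ p ∈ sets_list, p.1.Nodup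
instance (sets_list : List (List String × String)) : Decidable (Pre_find_exclusive_intersections sets_list) := by
  unfold Pre_find_exclusive_intersections; infer_instance
def pvWitness_find_exclusive_intersections : (List (List String × String)) :=
  [(["a","b","c"],"X"),(["b","c"],"Y"),(["c"],"Z")]
def Spec_find_exclusive_intersections (sets_list : List (List String × String)) (out : List (String × List String)) : Prop := out = find_exclusive_intersections_alt sets_list
instance (sets_list : List (List String × String)) (out : List (String × List String)) : Decidable (Spec_find_exclusive_intersections sets_list out) := by unfold Spec_find_exclusive_intersections; infer_instance

-- ===== CLAIM (what is proved, stated in full; the proofs are below) =====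
def Claim_equal_find_exclusive_intersections : Prop := ∀ (sets_list : List (List String × String)), Dom_find_exclusive_intersections sets_list → Pre_find_exclusive_intersections sets_list → Spec_find_exclusive_intersections sets_list (find_exclusive_intersections sets_list)

-- ===== LEMMAS AND PROOFS =====

-- generic fold/list lemmas
lemma pv_foldl_inner_flatMap {α β γ : Type} (g : α → List β) (f : γ → β → γ) :
    ∀ (xs : List α) (a : γ), xs.foldl (fun a x => (g x).foldl f a) a = (xs.flatMap g).foldl f a := by
  intro xs
  induction xs with
  | nil => intro a; rfl
  | cons x t ih => intro a; simp [List.foldl_append, ih]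

lemma pv_foldl_inter : ∀ (ts : List (List String)) (s : List String),
    ts.foldl PySem.Set.inter s = s.filter (fun x => ts.all (fun t => t.contains x)) := by
  intro ts
  induction ts with
  | nil => intro s; simp
  | cons t ts ih =>
      intro s
      simp only [List.foldl_cons, ih, PySem.Set.inter, List.filter_filter, List.all_cons]
      congr 1
      funext x
      exact Bool.and_comm _ _

lemma pv_add_of_not_mem {α : Type} [BEq α] [LawfulBEq α] {s : PySem.Set α} {x : α} (h : x ∉ s) :
    PySem.Set.add s x = s ++ [x] := by
  simp [PySem.Set.add, PySem.Set.contains, h]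

lemma pv_foldl_add_fresh {α : Type} [BEq α] [LawfulBEq α] :
    ∀ (xs : List α) (s : PySem.Set α), xs.Nodup → (∀ x ∈ xs, x ∉ s) →
      xs.foldl PySem.Set.add s = s ++ xs := by
  intro xs
  induction xs with
  | nil => intro s _ _; simp
  | cons x t ih =>
      intro s hnd hfresh
      simp only [List.nodup_cons] at hnd
      rw [List.foldl_cons, pv_add_of_not_mem (hfresh x (by simp))]
      rw [ih (s ++ [x]) hnd.2 (fun y hy => by
        simp only [List.mem_append, List.mem_singleton, not_or]
        exact ⟨hfresh y (by simp [hy]), fun he => hnd.1 (he ▸ hy)⟩)]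
      simp

lemma pv_ofList_eq_self {α : Type} [BEq α] [LawfulBEq α] {xs : List α} (h : xs.Nodup) :
    PySem.Set.ofList xs = xs := by
  rw [PySem.Set.ofList_eq_foldl, pv_foldl_add_fresh xs [] h (by simp)]
  simp

lemma pv_mem_foldl_update {α : Type} [BEq α] [LawfulBEq α] :
    ∀ (vs : List (List α)) (s : PySem.Set α) (x : α),
      x ∈ vs.foldl PySem.Set.update s ↔ x ∈ s ∨ ∃ v ∈ vs, x ∈ v := by
  intro vs
  induction vs with
  | nil => intro s x; simp
  | cons v t ih =>
      intro s x
      simp only [List.foldl_cons, ih, PySem.Set.mem_update]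
      constructor
      · rintro (⟨h | h⟩ | ⟨w, hw, hx⟩)
        · exact Or.inl h
        · exact Or.inr ⟨v, by simp, h⟩
        · exact Or.inr ⟨w, by simp [hw], hx⟩
      · rintro (h | ⟨w, hw, hx⟩)
        · exact Or.inl (Or.inl h)
        · rcases List.mem_cons.mp hw with rfl | hw'
          · exact Or.inl (Or.inr hx)
          · exact Or.inr ⟨w, hw', hx⟩

lemma pv_foldl_diff {β : Type} (q : β → Prop) [DecidablePred q] (val : β → PySem.Set String) :
    ∀ (l : List β) (e : List String),
    l.foldl (fun e b => if q b then PySem.Set.diff e (val b) else e) e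
      = e.filter (fun x => l.all (fun b => !(decide (q b) && PySem.Set.contains (val b) x))) := by
  intro l
  induction l with
  | nil => intro e; simp
  | cons b t ih =>
      intro e
      by_cases hq : q b
      · rw [List.foldl_cons, if_pos hq,
          show PySem.Set.diff e (val b) = e.filter (fun x => !PySem.Set.contains (val b) x) from rfl,
          ih, List.filter_filter]
        simp only [List.all_cons]
        congr 1
        funext x
        by_cases hm : PySem.Set.contains (val b) x = true <;> simp [hq, Bool.and_comm]
      · rw [List.foldl_cons, if_neg hq, ih]
        simp only [List.all_cons]
        congr 1
        funext x
        simp [hq]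

lemma pv_bool_eq_of_iff {a b : Bool} (h : a = true ↔ b = true) : a = b := by
  cases a <;> cases b <;> simp_all

-- the dict built by 'd[k] = g(k)' over a pair list: lookup is g on the seen keys
lemma pv_getD_foldl_insert_keyfn {κ μ ν : Type} [BEq κ] [LawfulBEq κ] [DecidableEq κ] (g : κ → ν) :
    ∀ (l : List (κ × μ)) (d : PySem.Dict κ ν) (k : κ) (d0 : ν),
    (l.foldl (fun d kv => d.insert kv.1 (g kv.1)) d).getD k d0
      = if k ∈ l.map Prod.fst then g k else d.getD k d0 := by
  intro l
  induction l with
  | nil => intro d k d0; simp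
  | cons kv t ih =>
      intro d k d0
      simp only [List.foldl_cons, ih, List.map_cons, List.mem_cons]
      by_cases hk : k ∈ t.map Prod.fst
      · simp [hk]
      · rw [PySem.Dict.getD_insert]
        by_cases he : k = kv.1 <;> simp [he, hk]

-- membership index: lookup collects exactly the recorded pairs
lemma pv_mem_getD_foldl_modify_add {κ ν : Type} [BEq κ] [LawfulBEq κ] [BEq ν] [LawfulBEq ν] :
    ∀ (l : List (κ × ν)) (d : PySem.Dict κ (List ν)) (k : κ) (y : ν),
    y ∈ (l.foldl (fun d q => d.modify q.1 [] (fun s => PySem.Set.add s q.2)) d).getD k []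
      ↔ y ∈ d.getD k [] ∨ (k, y) ∈ l := by
  intro l
  induction l with
  | nil => intro d k y; simp
  | cons q t ih =>
      intro d k y
      simp only [List.foldl_cons, ih, List.mem_cons]
      by_cases hk : k = q.1
      · subst hk
        rw [PySem.Dict.getD_modify_self, PySem.Set.mem_add]
        have hq : ((q.1, y) = q) ↔ y = q.2 := by
          constructor
          · intro h; exact congrArg Prod.snd h
          · intro h; exact Prod.ext rfl h
        rw [hq]
        tauto
      · rw [PySem.Dict.getD_modify_of_ne _ _ _ hk]
        have hq : ¬ ((k, y) = q) := fun h => hk (congrArg Prod.fst h)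
        tauto

-- ===== proof-side abbreviations =====
def pvElem (L : List (List String × String)) (i : Int) : List String × String :=
  PySem.List.pyGetD L i ([], "")
def pvIdx (L : List (List String × String)) : List Int :=
  PySem.List.pyRange 0 (L.length : Int) 1
def pvSizes (L : List (List String × String)) : List Int :=
  PySem.List.pyRange (L.length : Int) 0 (-1)
def pvE (L : List (List String × String)) : List (List Int) :=
  (pvSizes L).flatMap (fun k => PySem.List.combinations (pvIdx L) k.toNat)
def pvKeyC (L : List (List String × String)) (c : List Int) : String :=
  pvKey (List.map (fun s => s.2) (List.map (fun i => pvElem L i) c))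
def pvKeyB (L : List (List String × String)) (c : List Int) : String :=
  pvKey (c.map (fun i => (pvElem L i).2))
def pvInterC (L : List (List String × String)) (c : List Int) : List String :=
  pvInterAll (List.map (fun s => s.1) (List.map (fun i => pvElem L i) c))
def pvFlat (L : List (List String × String)) : List (String × Int) :=
  (pvIdx L).flatMap (fun j => (pvElem L j).1.map (fun x => (x, j)))
def pvMemD (L : List (List String × String)) : PySem.Dict String (List Int) :=
  (pvFlat L).foldl (fun d q => d.modify q.1 [] (fun s => PySem.Set.add s q.2)) PySem.Dict.empty
def pvValB (L : List (List String × String)) (c : List Int) : List String :=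
  PySem.Set.ofList
    (((pvElem L (PySem.List.pyGetD c 0 0)).1).filter
      (fun x => c.all (fun i => ((pvMemD L).getD x []).contains i)))
def pvAllInts (L : List (List String × String)) : PySem.Dict String (List String) :=
  (pvE L).foldl (fun d c => d.insert (pvKeyC L c) (pvInterC L c)) PySem.Dict.empty
def pvSL (k : String) : Nat := (PySem.Chars.splitOn k.toList "_AND_".toList).length
def pvPhaseA (D : PySem.Dict String (List String)) : List (String × List String) :=
  (D.items.foldl (fun out kv =>
    out.insert kv.1 (D.items.foldl
      (fun e kv2 => if pvSL kv2.1 > pvSL kv.1 then PySem.Set.diff e kv2.2 else e) kv.2))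
    PySem.Dict.empty).items
def pvDepth (D : PySem.Dict String (List String)) : PySem.Dict String Int :=
  D.items.foldl (fun d kv => d.insert kv.1 ((pvSL kv.1 : Int))) PySem.Dict.empty
def pvLvl (D : PySem.Dict String (List String)) (d : Int) : List String :=
  ((D.items.filter (fun kv => (pvDepth D).getD kv.1 0 == d)).map Prod.snd).foldl
    PySem.Set.update []
def pvAbove (D : PySem.Dict String (List String)) : PySem.Dict Int (List String) :=
  ((PySem.List.sorted (PySem.Set.ofList (pvDepth D).values) (fun x => x) true).foldl
    (fun p d => (p.1.insert d p.2, PySem.Set.update p.2 (pvLvl D d)))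
    ((PySem.Dict.empty : PySem.Dict Int (List String)), [])).1
def pvPhaseB (D : PySem.Dict String (List String)) : List (String × List String) :=
  (D.items.foldl
    (fun r kv => r.insert kv.1 (PySem.Set.diff kv.2 ((pvAbove D).getD ((pvDepth D).getD kv.1 0) [])))
    PySem.Dict.empty).items

-- basic facts about the index lists
lemma pvKeyB_eq_keyC (L : List (List String × String)) (c : List Int) : pvKeyB L c = pvKeyC L c := by
  simp [pvKeyB, pvKeyC, List.map_map]; rfl

lemma pv_map_elem_idx (L : List (List String × String)) :
    (pvIdx L).map (fun i => pvElem L i) = L := PySem.List.map_pyGetD_pyRange_zero L ([], "")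

lemma pv_idx_len (L : List (List String × String)) : (pvIdx L).length = L.length := by
  simp [pvIdx, PySem.List.length_pyRange_one]

lemma pv_mem_E_iff (L : List (List String × String)) (c : List Int) :
    c ∈ pvE L ↔ c.Sublist (pvIdx L) ∧ 1 ≤ c.length := by
  constructor
  · intro h
    simp only [pvE, List.mem_flatMap] at h
    obtain ⟨k, hk, hc⟩ := h
    rw [pvSizes, PySem.List.mem_pyRange_neg_one] at hk
    rw [PySem.List.mem_combinations_iff] at hc
    exact ⟨hc.1, by omega⟩
  · rintro ⟨hsub, hlen⟩
    simp only [pvE, List.mem_flatMap]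
    refine ⟨(c.length : Int), ?_, ?_⟩
    · rw [pvSizes, PySem.List.mem_pyRange_neg_one]
      have := hsub.length_le
      rw [pv_idx_len] at this
      omega
    · rw [PySem.List.mem_combinations_iff]
      exact ⟨hsub, by omega⟩

lemma pv_elem_mem (L : List (List String × String)) {c : List Int} (hc : c.Sublist (pvIdx L)) :
    ∀ i ∈ c, pvElem L i ∈ L := by
  intro i hi
  have h : pvElem L i ∈ (pvIdx L).map (fun i => pvElem L i) :=
    List.mem_map_of_mem (hc.subset hi)
  rwa [pv_map_elem_idx L] at h

lemma pvEA_eq (L : List (List String × String)) :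
    (pvSizes L).flatMap (fun k => PySem.List.combinations L k.toNat)
      = (pvE L).map (fun c => c.map (fun i => pvElem L i)) := by
  have hfun : ∀ k : Int, PySem.List.combinations L k.toNat
      = (PySem.List.combinations (pvIdx L) k.toNat).map (List.map (fun i => pvElem L i)) := by
    intro k
    rw [← PySem.List.combinations_map, pv_map_elem_idx]
  rw [pvE, List.map_flatMap]
  exact List.flatMap_congr (fun k _ => hfun k)

lemma pv_mem_flat (L : List (List String × String)) (x : String) (i : Int) :
    (x, i) ∈ pvFlat L ↔ i ∈ pvIdx L ∧ x ∈ (pvElem L i).1 := by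
  simp only [pvFlat, List.mem_flatMap, List.mem_map, Prod.mk.injEq]
  constructor
  · rintro ⟨j, hj, y, hy, rfl, rfl⟩
    exact ⟨hj, hy⟩
  · rintro ⟨hi, hx⟩
    exact ⟨i, hi, x, hx, rfl, rfl⟩

lemma pv_memD_char (L : List (List String × String)) (x : String) (i : Int) :
    i ∈ (pvMemD L).getD x [] ↔ i ∈ pvIdx L ∧ x ∈ (pvElem L i).1 := by
  rw [pvMemD, pv_mem_getD_foldl_modify_add, pv_mem_flat]
  simp

lemma pv_interC_filter (L : List (List String × String)) (c0 : Int) (ct : List Int) :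
    pvInterC L (c0 :: ct)
      = (pvElem L c0).1.filter (fun x => (ct.map (fun i => (pvElem L i).1)).all (fun t => t.contains x)) := by
  rw [pvInterC, List.map_cons, List.map_cons, pvInterAll, List.map_map]
  rw [pv_foldl_inter]
  rfl

-- the intersection of a subset equals the membership-index filter of its first set
lemma pv_valB_eq_interC (L : List (List String × String))
    (hinner : ∀ p ∈ L, p.1.Nodup) {c : List Int} (hc : c ∈ pvE L) :
    pvValB L c = pvInterC L c := by
  obtain ⟨hsub, hlen⟩ := (pv_mem_E_iff L c).mp hc
  obtain ⟨c0, ct, rfl⟩ : ∃ c0 ct, c = c0 :: ct := by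
    cases c with
    | nil => simp at hlen
    | cons a b => exact ⟨a, b, rfl⟩
  have hfirst0 : PySem.List.pyGetD (c0 :: ct) 0 0 = c0 := PySem.List.pyGetD_zero_cons c0 ct 0
  have hfnd : (pvElem L c0).1.Nodup :=
    hinner _ (pv_elem_mem L hsub c0 (by simp))
  rw [pvValB, hfirst0, pv_interC_filter]
  have hfe : ((pvElem L c0).1).filter
        (fun x => (c0 :: ct).all (fun i => ((pvMemD L).getD x []).contains i))
      = ((pvElem L c0).1).filter
        (fun x => (ct.map (fun i => (pvElem L i).1)).all (fun t => t.contains x)) := by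
    apply List.filter_congr
    intro x hx
    apply pv_bool_eq_of_iff
    simp only [List.all_cons, List.all_map, List.all_eq_true, Bool.and_eq_true, Function.comp]
    constructor
    · rintro ⟨_, hall⟩ i hi
      have := hall i hi
      simp only [List.contains_iff_mem, pv_memD_char] at this ⊢
      exact this.2
    · intro hall
      refine ⟨?_, ?_⟩
      · simp only [List.contains_iff_mem, pv_memD_char]
        exact ⟨hsub.subset (by simp), hx⟩
      · intro i hi
        simp only [List.contains_iff_mem, pv_memD_char]
        refine ⟨hsub.subset (by simp [hi]), ?_⟩
        have := hall i hi
        simpa using this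
  rw [hfe]
  exact pv_ofList_eq_self (hfnd.filter _)

-- ===== normalization of the two ports =====
lemma pv_A_norm (L : List (List String × String)) :
    find_exclusive_intersections L = pvPhaseA (pvAllInts L) := by
  unfold find_exclusive_intersections
  dsimp only
  rw [pv_foldl_inner_flatMap (fun (i : Int) => PySem.List.combinations L i.toNat)
    (fun (d : PySem.Dict String (List String)) subset =>
      d.insert (pvKey (subset.map (fun s => s.2))) (pvInterAll (subset.map (fun s => s.1))))]
  rw [show PySem.List.pyRange ((L.length : Nat) : Int) 0 (-1) = pvSizes L from rfl]
  rw [pvEA_eq, List.foldl_map]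
  rfl

lemma pv_B_norm (L : List (List String × String))
    (hinner : ∀ p ∈ L, p.1.Nodup) :
    find_exclusive_intersections_alt L = pvPhaseB (pvAllInts L) := by
  unfold find_exclusive_intersections_alt
  dsimp only
  rw [PySem.List.enumerate_eq_map_pyRange L ([], "")]
  rw [List.foldl_map]
  rw [show (fun (d : PySem.Dict String (List Int)) (j : Int) =>
        ((j, PySem.List.pyGetD L j ([], "")).2.1.foldl
          (fun d x => d.modify x [] (fun s => PySem.Set.add s (j, PySem.List.pyGetD L j ([], "")).1)) d))
      = (fun (d : PySem.Dict String (List Int)) (j : Int) =>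
          (((pvElem L j).1.map (fun x => (x, j))).foldl
            (fun d q => d.modify q.1 [] (fun s => PySem.Set.add s q.2)) d)) from by
    funext d j
    rw [List.foldl_map]
    rfl]
  rw [show PySem.List.pyRange 0 (PySem.List.len L) = pvIdx L from rfl]
  rw [pv_foldl_inner_flatMap (fun j => (pvElem L j).1.map (fun x => (x, j)))
    (fun (d : PySem.Dict String (List Int)) q => d.modify q.1 [] (fun s => PySem.Set.add s q.2))]
  rw [show (pvIdx L).flatMap (fun j => (pvElem L j).1.map (fun x => (x, j))) = pvFlat L from rfl]
  rw [show (pvFlat L).foldl (fun (d : PySem.Dict String (List Int)) q =>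
      d.modify q.1 [] (fun s => PySem.Set.add s q.2)) PySem.Dict.empty = pvMemD L from rfl]
  rw [show PySem.List.pyRange ((L.length : Nat) : Int) 0 (-1) = pvSizes L from rfl]
  rw [pv_foldl_inner_flatMap (fun (k : Int) =>
    PySem.List.combinations (PySem.List.pyRange 0 ((L.length : Nat) : Int) 1) k.toNat)]
  rw [show (pvSizes L).flatMap (fun (k : Int) =>
      PySem.List.combinations (PySem.List.pyRange 0 ((L.length : Nat) : Int) 1) k.toNat) = pvE L from rfl]
  have hfold : (pvE L).foldl
      (fun (d : PySem.Dict String (List String)) idxs =>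
        d.insert (pvKey (idxs.map (fun i => (PySem.List.pyGetD L i ([], "")).2)))
          (PySem.Set.ofList
            (((PySem.List.pyGetD L (PySem.List.pyGetD idxs 0 0) ([], "")).1).filter
              (fun x => idxs.all (fun i => ((pvMemD L).getD x []).contains i)))))
      PySem.Dict.empty = pvAllInts L := by
    rw [pvAllInts]
    apply PySem.List.foldl_congr_mem
    intro acc c hcmem
    rw [show pvKey (c.map (fun i => (PySem.List.pyGetD L i ([], "")).2)) = pvKeyB L c from rfl,
      pvKeyB_eq_keyC]
    rw [show PySem.Set.ofList
        (((PySem.List.pyGetD L (PySem.List.pyGetD c 0 0) ([], "")).1).filter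
          (fun x => c.all (fun i => ((pvMemD L).getD x []).contains i))) = pvValB L c from rfl]
    rw [pv_valB_eq_interC L hinner hcmem]
  rw [hfold]
  rfl

-- ===== the level sweep computes exactly A's subtract-all-deeper =====
lemma pv_sweep_preserve (lvl : Int → List String) :
    ∀ (ds : List Int) (s : PySem.Dict Int (List String) × List String) (p : Int),
    (∀ d ∈ ds, d ≠ p) →
    ((ds.foldl (fun s d => (s.1.insert d s.2, PySem.Set.update s.2 (lvl d))) s).1.getD p []
      = s.1.getD p []) := by
  intro ds
  induction ds with
  | nil => intro s p _; rfl
  | cons d t ih =>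
      intro s p hne
      simp only [List.foldl_cons]
      rw [ih _ p (fun d' hd' => hne d' (by simp [hd']))]
      rw [PySem.Dict.getD_insert, if_neg (fun h => hne d (by simp) (by omega))]

lemma pv_sweep_getD (lvl : Int → List String) :
    ∀ (ds : List Int), ds.Pairwise (· > ·) →
    ∀ (s : PySem.Dict Int (List String) × List String) (p : Int), p ∈ ds → ∀ (x : String),
    (x ∈ (ds.foldl (fun s d => (s.1.insert d s.2, PySem.Set.update s.2 (lvl d))) s).1.getD p []
      ↔ x ∈ s.2 ∨ ∃ d ∈ ds, d > p ∧ x ∈ lvl d) := by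
  intro ds
  induction ds with
  | nil => intro _ s p hp; exact absurd hp (by simp)
  | cons d t ih =>
      intro hpw s p hp x
      simp only [List.pairwise_cons] at hpw
      simp only [List.foldl_cons]
      rcases List.mem_cons.mp hp with rfl | hpt
      · rw [pv_sweep_preserve lvl t _ p (fun d' hd' => by have := hpw.1 d' hd'; omega)]
        rw [PySem.Dict.getD_insert_self]
        constructor
        · exact fun h => Or.inl h
        · rintro (h | ⟨d', hd', hgt, _⟩)
          · exact h
          · rcases List.mem_cons.mp hd' with rfl | hd'
            · omega
            · have := hpw.1 d' hd'; omega
      · rw [ih hpw.2 _ p hpt x]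
        simp only [PySem.Set.mem_update]
        constructor
        · rintro (⟨h | h⟩ | ⟨d', hd', hgt, hx⟩)
          · exact Or.inl h
          · exact Or.inr ⟨d, by simp, hpw.1 p hpt, h⟩
          · exact Or.inr ⟨d', by simp [hd'], hgt, hx⟩
        · rintro (h | ⟨d', hd', hgt, hx⟩)
          · exact Or.inl (Or.inl h)
          · rcases List.mem_cons.mp hd' with rfl | hd'
            · exact Or.inl (Or.inr hx)
            · exact Or.inr ⟨d', hd', hgt, hx⟩

-- ===== the two phase-2 passes agree on any dict with distinct keys =====
lemma pv_phase_eq (D : PySem.Dict String (List String)) (hnd : D.keys.Nodup) :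
    pvPhaseB D = pvPhaseA D := by
  have hkeys : D.items.map Prod.fst = D.keys := rfl
  have hdep : ∀ kv ∈ D.items, (pvDepth D).getD kv.1 0 = (pvSL kv.1 : Int) := by
    intro kv hkv
    rw [pvDepth, pv_getD_foldl_insert_keyfn (fun k => (pvSL k : Int))]
    rw [if_pos (by rw [hkeys]; exact PySem.Dict.mem_keys_of_mem_items _ hkv)]
  -- keys of the depth dict
  have hdepkeys : (pvDepth D).keys = D.keys := by
    rw [pvDepth]
    rw [show (fun (d : PySem.Dict String Int) (kv : String × List String) =>
        d.insert kv.1 ((pvSL kv.1 : Int)))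
      = (fun (d : PySem.Dict String Int) (kv : String × List String) =>
        d.insert ((fun kv : String × List String => kv.1) kv)
          ((fun (_ : PySem.Dict String Int) (kv : String × List String) => ((pvSL kv.1 : Int))) d kv)) from rfl]
    rw [PySem.Dict.keys_foldl_insert_key]
    rw [PySem.Dict.keys_empty, hkeys]
    exact pv_ofList_eq_self hnd
  have hvals : (pvDepth D).values = D.keys.map (fun k => (pvSL k : Int)) := by
    rw [PySem.Dict.values_eq_map_keys _ (by rw [hdepkeys]; exact hnd) 0, hdepkeys]
    apply List.map_congr_left
    intro k hk
    rw [← hkeys] at hk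
    obtain ⟨kv, hkv, rfl⟩ := List.mem_map.mp hk
    exact hdep kv hkv
  set ds := PySem.List.sorted (PySem.Set.ofList (pvDepth D).values) (fun x => x) true with hds
  have hdsmem : ∀ d : Int, d ∈ ds ↔ ∃ k ∈ D.keys, (pvSL k : Int) = d := by
    intro d
    rw [hds, PySem.List.mem_sorted, PySem.Set.mem_ofList, hvals]
    simp
  have hdspw : ds.Pairwise (· > ·) := by
    have h1 : ds.Pairwise (fun a b => (fun x => x) b ≤ (fun x => x) a) :=
      PySem.List.sorted_pairwise_rev _ _
    have h2 : ds.Nodup :=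
      ((PySem.List.sorted_perm _ _ _).nodup_iff).mpr (PySem.Set.nodup_ofList _)
    exact (h1.and h2).imp (fun h => lt_of_le_of_ne h.1 h.2.symm)
  have hlvlmem : ∀ (d : Int) (x : String),
      x ∈ pvLvl D d ↔ ∃ kv ∈ D.items, (pvDepth D).getD kv.1 0 = d ∧ x ∈ kv.2 := by
    intro d x
    rw [pvLvl, pv_mem_foldl_update]
    simp only [List.mem_map, List.mem_filter, beq_iff_eq]
    constructor
    · rintro (h | ⟨v, ⟨kv, ⟨hkv, hd⟩, rfl⟩, hx⟩)
      · simp at h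
      · exact ⟨kv, hkv, hd, hx⟩
    · rintro ⟨kv, hkv, hd, hx⟩
      exact Or.inr ⟨kv.2, ⟨kv, ⟨hkv, hd⟩, rfl⟩, hx⟩
  have habove : ∀ kv ∈ D.items, ∀ (x : String),
      (x ∈ (pvAbove D).getD ((pvDepth D).getD kv.1 0) []
        ↔ ∃ kv2 ∈ D.items, pvSL kv2.1 > pvSL kv.1 ∧ x ∈ kv2.2) := by
    intro kv hkv x
    rw [pvAbove, ← hds]
    have hp : (pvDepth D).getD kv.1 0 ∈ ds := by
      rw [hdsmem]
      exact ⟨kv.1, PySem.Dict.mem_keys_of_mem_items _ hkv, (hdep kv hkv).symm⟩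
    rw [pv_sweep_getD (pvLvl D) ds hdspw _ _ hp x]
    simp only [List.not_mem_nil, false_or]
    constructor
    · rintro ⟨d, hd, hgt, hx⟩
      obtain ⟨kv2, hkv2, hdep2, hx2⟩ := (hlvlmem d x).mp hx
      refine ⟨kv2, hkv2, ?_, hx2⟩
      rw [hdep kv hkv] at hgt
      rw [hdep kv2 hkv2] at hdep2
      omega
    · rintro ⟨kv2, hkv2, hgt, hx⟩
      refine ⟨(pvSL kv2.1 : Int), ?_, ?_, ?_⟩
      · rw [hdsmem]
        exact ⟨kv2.1, PySem.Dict.mem_keys_of_mem_items _ hkv2, rfl⟩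
      · rw [hdep kv hkv]
        omega
      · rw [hlvlmem]
        exact ⟨kv2, hkv2, hdep kv2 hkv2, hx⟩
  -- final fold: values inserted coincide
  rw [pvPhaseB, pvPhaseA]
  congr 1
  apply PySem.List.foldl_congr_mem
  intro acc kv hkv
  congr 1
  rw [pv_foldl_diff (fun kv2 : String × List String => pvSL kv2.1 > pvSL kv.1) Prod.snd]
  rw [show PySem.Set.diff kv.2 ((pvAbove D).getD ((pvDepth D).getD kv.1 0) [])
    = kv.2.filter (fun x => !PySem.Set.contains ((pvAbove D).getD ((pvDepth D).getD kv.1 0) []) x)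
    from rfl]
  apply List.filter_congr
  intro x _
  apply pv_bool_eq_of_iff
  rw [Bool.not_eq_true']
  rw [show (PySem.Set.contains ((pvAbove D).getD ((pvDepth D).getD kv.1 0) []) x = false)
      ↔ ¬ (x ∈ (pvAbove D).getD ((pvDepth D).getD kv.1 0) [])
    from by rw [← PySem.Set.contains_iff]; simp]
  rw [habove kv hkv x]
  simp only [List.all_eq_true, Bool.not_eq_true', Bool.and_eq_false_iff]
  constructor
  · intro hno kv2 hkv2
    by_cases hgt : pvSL kv2.1 > pvSL kv.1
    · right
      rw [← Bool.not_eq_true, PySem.Set.contains_iff]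
      intro hx
      exact hno ⟨kv2, hkv2, hgt, hx⟩
    · left
      simpa using hgt
  · rintro hall ⟨kv2, hkv2, hgt, hx⟩
    rcases hall kv2 hkv2 with h | h
    · rw [decide_eq_false_iff_not] at h
      exact h hgt
    · rw [← Bool.not_eq_true, PySem.Set.contains_iff] at h
      exact h hx

lemma pv_allInts_keys_nodup (L : List (List String × String)) : (pvAllInts L).keys.Nodup := by
  rw [pvAllInts]
  rw [show (fun (d : PySem.Dict String (List String)) (c : List Int) =>
      d.insert (pvKeyC L c) (pvInterC L c))
    = (fun (d : PySem.Dict String (List String)) (c : List Int) =>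
      d.insert ((fun c => pvKeyC L c) c)
        ((fun (_ : PySem.Dict String (List String)) (c : List Int) => pvInterC L c) d c)) from rfl]
  exact PySem.Dict.nodup_keys_foldl_insert_key _ _ _ _ PySem.Dict.nodup_keys_empty

-- ===== VERDICT (by name: the statement is the Claim_ definition above) =====
theorem find_exclusive_intersections_spec : Claim_equal_find_exclusive_intersections := by
  intro L _hdom hpre
  show find_exclusive_intersections L = find_exclusive_intersections_alt L
  rw [pv_A_norm L, pv_B_norm L hpre, pv_phase_eq _ (pv_allInts_keys_nodup L)]
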